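-- pv_equiv track=rewrite | github.com/rayari-1729/AGENTIC_AI_SUMMIT-2025 | ai_agents_hackathon/solution.py | select_culprit
-- ===== SOURCE A (Python) =====
-- from typing import Any, Dict, List, Optional, Tuple, Set
--
-- def select_culprit(
--     suspects: List[str], scores: Dict[str, int], flags: Dict[str, Dict[str, bool]]
-- ) -> str:
--     if not suspects:
--         return "Unknown"
--     max_score = max(scores.values()) if scores else 0
--     candidates = [s for s in suspects if scores.get(s, 0) == max_score]
--     if len(candidates) == 1:
--         return candidates[0]
--
--     def _filter(cands: List[str], key: str) -> List[str]:
--         return [c for c in cands if flags.get(c, {}).get(key)]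
--
--     for preference in ("confession", "fingerprint", "cctv", "witness"):
--         filtered = _filter(candidates, preference)
--         if filtered:
--             candidates = filtered
--             break
--
--     return sorted(candidates)[0]
-- ===== SOURCE B (Python) =====
-- from typing import Dict, List
--
-- def select_culprit(
--     suspects: List[str], scores: Dict[str, int], flags: Dict[str, Dict[str, bool]]
-- ) -> str:
--     if not suspects:
--         return "Unknown"
--     max_score = max(scores.values()) if scores else 0
--     candidates = [s for s in suspects if scores.get(s, 0) == max_score]
--
--     prefs = ("confession", "fingerprint", "cctv", "witness")
--
--     def rank(c: str) -> int:
--         f = flags.get(c, {})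
--         for i, p in enumerate(prefs):
--             if f.get(p):
--                 return i
--         return 4
--
--     return min(candidates, key=lambda c: (rank(c), c))
-- ===== Notes on version B (the rewrite author's own statement) =====
-- stated objective: simpler
-- what changed: The four-iteration preference-filter loop with break followed by sorted(candidates)[0] is replaced by a single min(candidates, key=lambda c: (rank(c), c)) where rank(c) is the index of the first preference flag set for c (4 if none), selecting the minimal preference rank and breaking ties lexicographically in one pass.
import Mathlib
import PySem

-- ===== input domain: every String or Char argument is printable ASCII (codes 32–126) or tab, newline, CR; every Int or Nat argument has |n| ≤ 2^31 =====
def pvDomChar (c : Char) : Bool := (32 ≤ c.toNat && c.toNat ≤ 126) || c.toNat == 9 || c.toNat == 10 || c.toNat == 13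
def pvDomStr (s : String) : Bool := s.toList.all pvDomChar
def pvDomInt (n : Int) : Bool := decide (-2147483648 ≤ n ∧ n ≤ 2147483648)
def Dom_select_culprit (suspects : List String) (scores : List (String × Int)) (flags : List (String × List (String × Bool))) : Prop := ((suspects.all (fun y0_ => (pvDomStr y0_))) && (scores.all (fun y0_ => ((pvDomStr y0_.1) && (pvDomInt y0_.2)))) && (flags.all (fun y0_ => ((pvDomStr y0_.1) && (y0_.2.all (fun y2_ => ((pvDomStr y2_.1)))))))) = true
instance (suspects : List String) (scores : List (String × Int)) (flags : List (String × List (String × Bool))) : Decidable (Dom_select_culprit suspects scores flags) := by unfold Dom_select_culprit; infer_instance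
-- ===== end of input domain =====

-- B replaces A's break-on-first-nonempty preference-filter loop plus sorted()[0] by a single
-- min over candidates keyed by (preference rank, name); objective: simpler (one pass, same result).


-- Helpers shared by both ports (the two Pythons share these lines verbatim):
-- max(scores.values()) if scores else 0
def pvMaxScore (scores : List (String × Int)) : Int :=
  match (PySem.Dict.ofList scores).values with
  | [] => 0
  | v :: t => t.foldl max v

-- [s for s in suspects if scores.get(s, 0) == max_score]
def pvCandidates (suspects : List String) (scores : List (String × Int)) : List String :=
  suspects.filter (fun s => (PySem.Dict.ofList scores).getD s 0 == pvMaxScore scores)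

-- flags.get(c, {}).get(p) is truthy  (the value is a bool; an absent key is falsy)
def pvTruthy (flags : List (String × List (String × Bool))) (c p : String) : Bool :=
  (PySem.Dict.ofList ((PySem.Dict.ofList flags).getD c [])).getD p false

-- ===== PORT A =====
-- def _filter(cands, key): return [c for c in cands if flags.get(c, {}).get(key)]
def pvFilterFlag (flags : List (String × List (String × Bool))) (cands : List String) (p : String) : List String :=
  cands.filter (fun c => pvTruthy flags c p)

-- for preference in (...): filtered = _filter(candidates, preference); if filtered: candidates = filtered; break
def pvPrefLoop (flags : List (String × List (String × Bool))) (cands : List String) : List String → List String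
  | [] => cands
  | p :: ps =>
      let filtered := pvFilterFlag flags cands p
      if filtered.isEmpty then pvPrefLoop flags cands ps else filtered

def pvPrefs : List String := ["confession", "fingerprint", "cctv", "witness"]

def select_culprit (suspects : List String) (scores : List (String × Int)) (flags : List (String × List (String × Bool))) : String :=
  if suspects.isEmpty then "Unknown"
  else if (pvCandidates suspects scores).length == 1 then (pvCandidates suspects scores).headD ""
  else
    -- sorted(candidates)[0]; [0] of the empty list raises IndexError (excluded by Pre_)
    (PySem.List.sorted (pvPrefLoop flags (pvCandidates suspects scores) pvPrefs) (fun x => x)).headD ""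

-- ===== PORT B =====
-- rank(c): index of the first truthy preference flag, 4 if none (loop over enumerate(prefs))
def pvRankAux (flags : List (String × List (String × Bool))) (c : String) : Nat → List String → Nat
  | _, [] => 4
  | i, p :: ps => if pvTruthy flags c p then i else pvRankAux flags c (i + 1) ps

def pvRank (flags : List (String × List (String × Bool))) (c : String) : Nat :=
  pvRankAux flags c 0 pvPrefs

def select_culprit_alt (suspects : List String) (scores : List (String × Int)) (flags : List (String × List (String × Bool))) : String :=
  if suspects.isEmpty then "Unknown"
  else
    -- min(candidates, key=lambda c: (rank(c), c)); min of the empty list raises ValueError (excluded by Pre_)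
    (PySem.List.min2? (pvCandidates suspects scores) (fun c => pvRank flags c) (fun c => c)).getD ""

-- ===== PRECONDITION & SPEC =====
-- Kernel-fast helpers for Pre_ (proved below to equal the ports' dict computations):
-- the score of s (last pair wins, as in dict(scores)), and the maximal score (0 if none).
def pvLook (scores : List (String × Int)) (s : String) : Int :=
  ((scores.reverse.find? (fun kv => kv.1 == s)).map (fun kv => kv.2)).getD 0

def pvMaxLook (scores : List (String × Int)) : Int :=
  match scores.map (fun kv => pvLook scores kv.1) with
  | [] => 0
  | v :: t => t.foldl (fun a b => if a ≤ b then b else a) v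

-- Pre_ excludes inputs where suspects is nonempty but NO suspect attains the maximal score:
-- there the candidate list is empty and Python A raises IndexError (B raises ValueError).
def Pre_select_culprit (suspects : List String) (scores : List (String × Int)) (flags : List (String × List (String × Bool))) : Prop :=
  (suspects.isEmpty || suspects.any (fun s => pvLook scores s == pvMaxLook scores)) = true
instance (suspects : List String) (scores : List (String × Int)) (flags : List (String × List (String × Bool))) : Decidable (Pre_select_culprit suspects scores flags) := by unfold Pre_select_culprit; infer_instance

def pvWitness_select_culprit : List String × (List (String × Int)) × (List (String × List (String × Bool))) :=
  (["alice", "bob"], [("alice", 5), ("bob", 5)], [("bob", [("cctv", true)])])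

def Spec_select_culprit (suspects : List String) (scores : List (String × Int)) (flags : List (String × List (String × Bool))) (out : String) : Prop := out = select_culprit_alt suspects scores flags
instance (suspects : List String) (scores : List (String × Int)) (flags : List (String × List (String × Bool))) (out : String) : Decidable (Spec_select_culprit suspects scores flags out) := by unfold Spec_select_culprit; infer_instance

-- ===== CLAIM (what is proved, stated in full; the proofs are below) =====
def Claim_equal_select_culprit : Prop := ∀ (suspects : List String) (scores : List (String × Int)) (flags : List (String × List (String × Bool))), Dom_select_culprit suspects scores flags → Pre_select_culprit suspects scores flags → Spec_select_culprit suspects scores flags (select_culprit suspects scores flags)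

-- ===== LEMMAS AND PROOFS =====

-- lexicographic "≤" on the (rank, name) key, as Python compares the tuples
def pvLexLe {α : Type} (k1 : α → Nat) (k2 : α → String) (a b : α) : Prop :=
  k1 a < k1 b ∨ (k1 a = k1 b ∧ k2 a ≤ k2 b)

theorem pvLexLe_trans {α : Type} (k1 : α → Nat) (k2 : α → String) {a b c : α}
    (h1 : pvLexLe k1 k2 a b) (h2 : pvLexLe k1 k2 b c) : pvLexLe k1 k2 a c := by
  rcases h1 with h1 | ⟨h1, h1'⟩ <;> rcases h2 with h2 | ⟨h2, h2'⟩
  · exact Or.inl (h1.trans h2)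
  · exact Or.inl (h2 ▸ h1)
  · exact Or.inl (h1 ▸ h2)
  · exact Or.inr ⟨h1.trans h2, le_trans h1' h2'⟩

-- the fold inside PySem.List.min2?, starting from an accumulator, yields a minimum
theorem pvMin2_fold_spec {α : Type} (k1 : α → Nat) (k2 : α → String) :
    ∀ (cs : List α) (m : α),
      ∃ r, List.foldl
            (fun acc x =>
              match acc with
              | none => some x
              | some m =>
                if (decide (k1 x < k1 m) || !decide (k1 m < k1 x) && decide (k2 x < k2 m)) = true
                then some x else some m)
            (some m) cs = some r ∧ (r = m ∨ r ∈ cs) ∧ pvLexLe k1 k2 r m ∧ ∀ c ∈ cs, pvLexLe k1 k2 r c := by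
  intro cs
  induction cs with
  | nil => exact fun m => ⟨m, rfl, Or.inl rfl, Or.inr ⟨rfl, le_refl _⟩, by simp⟩
  | cons x t ih =>
    intro m
    rw [List.foldl_cons]
    by_cases hc : (decide (k1 x < k1 m) || !decide (k1 m < k1 x) && decide (k2 x < k2 m)) = true
    · -- new accumulator is x, and x ≤lex m
      have hxm : pvLexLe k1 k2 x m := by
        simp only [Bool.or_eq_true, Bool.and_eq_true, Bool.not_eq_true', decide_eq_true_eq,
          decide_eq_false_iff_not] at hc
        rcases hc with h | ⟨h, h'⟩
        · exact Or.inl h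
        · rcases Nat.lt_or_ge (k1 x) (k1 m) with h2 | h2
          · exact Or.inl h2
          · exact Or.inr ⟨le_antisymm (not_lt.mp h) h2, le_of_lt h'⟩
      obtain ⟨r, hr, hmem, hle, hall⟩ := ih x
      have hstep : (match some m with
          | none => some x
          | some m =>
            if (decide (k1 x < k1 m) || !decide (k1 m < k1 x) && decide (k2 x < k2 m)) = true
            then some x else some m) = some x := by
        simp only [if_pos hc]
      rw [hstep]
      refine ⟨r, hr, ?_, pvLexLe_trans k1 k2 hle hxm, ?_⟩
      · rcases hmem with h | h
        · exact Or.inr (by simp [h])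
        · exact Or.inr (List.mem_cons_of_mem _ h)
      · intro c hcm
        rcases List.mem_cons.mp hcm with h | h
        · exact h ▸ hle
        · exact hall c h
    · -- accumulator stays m, and m ≤lex x
      have hmx : pvLexLe k1 k2 m x := by
        simp only [Bool.or_eq_true, Bool.and_eq_true, Bool.not_eq_true', decide_eq_true_eq,
          decide_eq_false_iff_not, not_or, not_and, not_lt] at hc
        obtain ⟨h1, h2⟩ := hc
        rcases Nat.lt_or_ge (k1 m) (k1 x) with h3 | h3
        · exact Or.inl h3
        · have he : k1 m = k1 x := le_antisymm h1 h3
          exact Or.inr ⟨he, h2 he.symm.le⟩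
      obtain ⟨r, hr, hmem, hle, hall⟩ := ih m
      have hstep : (match some m with
          | none => some x
          | some m' =>
            if (decide (k1 x < k1 m') || !decide (k1 m' < k1 x) && decide (k2 x < k2 m')) = true
            then some x else some m') = some m := by
        simp only [if_neg hc]
      rw [hstep]
      refine ⟨r, hr, ?_, hle, ?_⟩
      · rcases hmem with h | h
        · exact Or.inl h
        · exact Or.inr (List.mem_cons_of_mem _ h)
      · intro c hcm
        rcases List.mem_cons.mp hcm with h | h
        · exact h ▸ pvLexLe_trans k1 k2 hle hmx
        · exact hall c h

-- min2? of a nonempty list returns a member minimal under the lexicographic key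
theorem pvMin2_spec {α : Type} (k1 : α → Nat) (k2 : α → String) (cs : List α) (h : cs ≠ []) :
    ∃ r, PySem.List.min2? cs k1 k2 = some r ∧ r ∈ cs ∧ ∀ c ∈ cs, pvLexLe k1 k2 r c := by
  match cs, h with
  | x :: t, _ =>
    obtain ⟨r, hr, hmem, hle, hall⟩ := pvMin2_fold_spec k1 k2 t x
    refine ⟨r, ?_, ?_, ?_⟩
    · simpa [PySem.List.min2?] using hr
    · rcases hmem with h | h
      · exact h ▸ List.mem_cons_self
      · exact List.mem_cons_of_mem _ h
    · intro c hc
      rcases List.mem_cons.mp hc with h | h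
      · exact h ▸ hle
      · exact hall c h

-- with the identity second key, the selected VALUE depends only on the first key's values on members
theorem pvMin2_getD_congr (k1 k1' : String → Nat) (cs : List String) (hcs : cs ≠ [])
    (h : ∀ c ∈ cs, k1 c = k1' c) :
    (PySem.List.min2? cs k1 (fun c => c)).getD "" = (PySem.List.min2? cs k1' (fun c => c)).getD "" := by
  obtain ⟨r, hr, hm, hall⟩ := pvMin2_spec k1 (fun c => c) cs hcs
  obtain ⟨r', hr', hm', hall'⟩ := pvMin2_spec k1' (fun c => c) cs hcs
  rw [hr, hr', Option.getD_some, Option.getD_some]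
  have h1 := hall r' hm'
  have h2 := hall' r hm
  simp only [pvLexLe] at h1 h2
  rw [h r hm, h r' hm'] at h1
  rcases h1 with h1 | ⟨h1, h1'⟩ <;> rcases h2 with h2 | ⟨h2, h2'⟩ <;> try omega
  exact le_antisymm h1' h2'

-- pvRankAux is at least its starting index when the remaining suffix fits below the sentinel 4
theorem pvRankAux_ge (flags : List (String × List (String × Bool))) (c : String) :
    ∀ (ps : List String) (i : Nat), i + ps.length ≤ 4 → i ≤ pvRankAux flags c i ps := by
  intro ps
  induction ps with
  | nil => intro i h; simp only [pvRankAux]; omega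
  | cons p ps ih =>
    intro i h
    simp only [pvRankAux]
    split
    · exact le_refl _
    · have := ih (i + 1) (by simp at h ⊢; omega)
      omega

-- head of a Python sort (no key) of a nonempty list is its minimum string
theorem pvSortedHead_spec (cs : List String) (h : cs ≠ []) :
    ∃ m t, PySem.List.sorted cs (fun x => x) = m :: t ∧ m ∈ cs ∧ ∀ c ∈ cs, m ≤ c := by
  match hs : PySem.List.sorted cs (fun x => x) with
  | [] => exact absurd ((PySem.List.sorted_eq_nil_iff cs (fun x => x) false).mp hs) h
  | m :: t =>
    refine ⟨m, t, rfl, ?_, ?_⟩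
    · exact ((PySem.List.sorted_perm cs (fun x => x) false).mem_iff).mp (hs ▸ List.mem_cons_self)
    · exact PySem.List.key_head_sorted_le cs (fun x => x) hs

-- ---- Bridge: the Pre_ helpers equal the ports' dict computations ----

theorem pvOfList_append (l : List (String × Int)) (p : String × Int) :
    PySem.Dict.ofList (l ++ [p]) = (PySem.Dict.ofList l).insert p.1 p.2 := by
  simp [PySem.Dict.ofList, PySem.Dict.update, List.foldl_append]

theorem pvLook_eq (scores : List (String × Int)) (s : String) :
    (PySem.Dict.ofList scores).getD s 0 = pvLook scores s := by
  induction scores using List.reverseRecOn with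
  | nil => simp [pvLook, PySem.Dict.ofList, PySem.Dict.update, PySem.Dict.getD_empty]
  | append_singleton l p ih =>
    rw [pvOfList_append, PySem.Dict.getD_insert]
    simp only [pvLook, List.reverse_append, List.reverse_cons, List.reverse_nil,
      List.nil_append, List.singleton_append, List.find?_cons]
    by_cases h : s = p.1
    · simp [h]
    · have hb : (p.1 == s) = false := by
        simp only [beq_eq_false_iff_ne, ne_eq]
        exact fun he => h he.symm
      simp only [hb, if_neg h]
      exact ih

theorem pvMem_keys_update (ps : List (String × Int)) :
    ∀ (d : PySem.Dict String Int) (k : String),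
      k ∈ (d.update ps).keys ↔ k ∈ ps.map Prod.fst ∨ k ∈ d.keys := by
  induction ps with
  | nil => intro d k; simp [PySem.Dict.update]
  | cons p t ih =>
    intro d k
    have hstep : d.update (p :: t) = (d.insert p.1 p.2).update t := by
      simp [PySem.Dict.update]
    rw [hstep, ih, PySem.Dict.mem_keys_insert]
    simp
    tauto

-- the shape of both max computations (proof-side only)
def pvMatchMax (l : List Int) : Int :=
  match l with
  | [] => 0
  | v :: t => t.foldl max v

theorem pvMaxList_eq (l1 l2 : List Int) (hm : ∀ v, v ∈ l1 ↔ v ∈ l2) :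
    pvMatchMax l1 = pvMatchMax l2 := by
  unfold pvMatchMax
  match l1, l2 with
  | [], [] => rfl
  | [], w :: t2 => exact absurd ((hm w).mpr List.mem_cons_self) (by simp)
  | v :: t1, [] => exact absurd ((hm v).mp List.mem_cons_self) (by simp)
  | v :: t1, w :: t2 =>
    have h1 := PySem.List.le_foldl_max t1 v
    have h2 := PySem.List.le_foldl_max t2 w
    have m1mem : t1.foldl max v ∈ v :: t1 := by
      rcases PySem.List.foldl_max_mem t1 v with h | h
      · simp [h]
      · exact List.mem_cons_of_mem _ h
    have m2mem : t2.foldl max w ∈ w :: t2 := by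
      rcases PySem.List.foldl_max_mem t2 w with h | h
      · simp [h]
      · exact List.mem_cons_of_mem _ h
    refine le_antisymm ?_ ?_
    · rcases List.mem_cons.mp ((hm _).mp m1mem) with h | h
      · exact h ▸ h2.1
      · exact h2.2 _ h
    · rcases List.mem_cons.mp ((hm _).mpr m2mem) with h | h
      · exact h ▸ h1.1
      · exact h1.2 _ h

theorem pvMaxLook_eq (scores : List (String × Int)) : pvMaxScore scores = pvMaxLook scores := by
  have hif : pvMaxLook scores = pvMatchMax (scores.map (fun kv => pvLook scores kv.1)) := by
    unfold pvMaxLook pvMatchMax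
    have hfn : (fun (a b : Int) => if a ≤ b then b else a) = max := by
      funext a b; rw [max_def]
    rw [hfn]
  have hmem : ∀ v, v ∈ (PySem.Dict.ofList scores).values ↔
      v ∈ scores.map (fun kv => pvLook scores kv.1) := by
    intro v
    rw [PySem.Dict.values_eq_map_keys _ (PySem.Dict.nodup_keys_ofList scores) 0]
    constructor
    · intro hv
      obtain ⟨k, hk, rfl⟩ := List.mem_map.mp hv
      have hk' : k ∈ scores.map Prod.fst ∨ k ∈ (PySem.Dict.empty (κ := String) (ν := Int)).keys :=
        (pvMem_keys_update scores PySem.Dict.empty k).mp hk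
      rcases hk' with hk' | hk'
      · obtain ⟨kv, hkv, rfl⟩ := List.mem_map.mp hk'
        exact List.mem_map.mpr ⟨kv, hkv, (pvLook_eq scores kv.1).symm⟩
      · simp [PySem.Dict.keys_empty] at hk'
    · intro hv
      obtain ⟨kv, hkv, rfl⟩ := List.mem_map.mp hv
      refine List.mem_map.mpr ⟨kv.1, ?_, pvLook_eq scores kv.1⟩
      exact (pvMem_keys_update scores PySem.Dict.empty kv.1).mpr
        (Or.inl (List.mem_map.mpr ⟨kv, hkv, rfl⟩))
  rw [hif]
  have hms : pvMaxScore scores = pvMatchMax (PySem.Dict.ofList scores).values := rfl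
  rw [hms]
  exact pvMaxList_eq _ _ hmem

-- THE CORE LEMMA: A's filter-loop-then-sort-head equals B's min by (rank, name),
-- generalized over the remaining preference list ps starting at index i.
theorem pvLoop_eq_min (flags : List (String × List (String × Bool))) :
    ∀ (ps : List String) (i : Nat) (cs : List String), cs ≠ [] → i + ps.length ≤ 4 →
      (PySem.List.sorted (pvPrefLoop flags cs ps) (fun x => x)).headD "" =
      (PySem.List.min2? cs (fun c => pvRankAux flags c i ps) (fun c => c)).getD "" := by
  intro ps
  induction ps with
  | nil =>
    intro i cs hcs _
    -- loop exhausted: A sorts cs itself; every rank is the constant 4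
    obtain ⟨m, t, hs, hmem, hmin⟩ := pvSortedHead_spec cs hcs
    obtain ⟨r, hr, hrmem, hrall⟩ := pvMin2_spec (fun c => pvRankAux flags c i []) (fun c => c) cs hcs
    simp only [pvPrefLoop, hs, hr, List.headD_cons, Option.getD_some]
    refine le_antisymm (hmin r hrmem) ?_
    rcases hrall m hmem with h | ⟨_, h⟩
    · simp [pvRankAux] at h
    · exact h
  | cons p ps ih =>
    intro i cs hcs hlen
    have hlen' : i + 1 + ps.length ≤ 4 := by simp at hlen; omega
    by_cases hf : (pvFilterFlag flags cs p).isEmpty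
    · -- filter empty: the loop recurses; no c ∈ cs is truthy for p, so ranks shift to the tail
      have hnot : ∀ c ∈ cs, pvTruthy flags c p = false := by
        intro c hc
        by_contra hcT
        have hmemf : c ∈ pvFilterFlag flags cs p :=
          List.mem_filter.mpr ⟨hc, by simpa using hcT⟩
        rw [List.isEmpty_iff] at hf
        simp [hf] at hmemf
      have hkeys : ∀ c ∈ cs, pvRankAux flags c (i + 1) ps = pvRankAux flags c i (p :: ps) := by
        intro c hc
        simp [pvRankAux, hnot c hc]
      rw [show pvPrefLoop flags cs (p :: ps) = pvPrefLoop flags cs ps by simp [pvPrefLoop, hf]]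
      rw [ih (i + 1) cs hcs hlen']
      exact pvMin2_getD_congr _ _ cs hcs hkeys
    · -- filter nonempty: A takes the filtered list; the minimal rank over cs is exactly i
      have hfne : pvFilterFlag flags cs p ≠ [] := fun hnil => hf (by simp [hnil])
      rw [show pvPrefLoop flags cs (p :: ps) = pvFilterFlag flags cs p by simp [pvPrefLoop, hf]]
      obtain ⟨m, t, hs, hmem, hmin⟩ := pvSortedHead_spec _ hfne
      obtain ⟨r, hr, hrmem, hrall⟩ := pvMin2_spec (fun c => pvRankAux flags c i (p :: ps)) (fun c => c) cs hcs
      simp only [hs, hr, List.headD_cons, Option.getD_some]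
      have hmT : pvTruthy flags m p = true := by
        have := List.mem_filter.mp hmem
        simpa using this.2
      have hmcs : m ∈ cs := (List.mem_filter.mp hmem).1
      have hrankm : pvRankAux flags m i (p :: ps) = i := by simp [pvRankAux, hmT]
      have hrm := hrall m hmcs
      simp only [pvLexLe] at hrm
      have hrT : pvTruthy flags r p = true := by
        by_contra hcb
        rw [Bool.not_eq_true] at hcb
        have hshift : pvRankAux flags r i (p :: ps) = pvRankAux flags r (i + 1) ps := by
          simp [pvRankAux, hcb]
        have hge := pvRankAux_ge flags r ps (i + 1) hlen'
        rcases hrm with h | ⟨h, _⟩ <;> omega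
      have hrfil : r ∈ pvFilterFlag flags cs p :=
        List.mem_filter.mpr ⟨hrmem, by simpa using hrT⟩
      have hrranki : pvRankAux flags r i (p :: ps) = i := by simp [pvRankAux, hrT]
      refine le_antisymm (hmin r hrfil) ?_
      rcases hrm with h | ⟨_, h⟩
      · rw [hrranki, hrankm] at h; omega
      · exact h

-- ===== VERDICT (by name: the statement is the Claim_ definition above) =====
theorem select_culprit_spec : Claim_equal_select_culprit := by
  intro suspects scores flags _ hpre
  unfold Spec_select_culprit select_culprit select_culprit_alt
  by_cases hemp : suspects.isEmpty
  · simp [hemp]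
  · simp only [hemp, Bool.false_eq_true, if_false]
    have hsne : suspects ≠ [] := fun h => hemp (by simp [h])
    have hcne : pvCandidates suspects scores ≠ [] := by
      unfold Pre_select_culprit at hpre
      simp only [Bool.or_eq_true, List.isEmpty_iff, List.any_eq_true, beq_iff_eq] at hpre
      rcases hpre with h | ⟨s, hs, hscore⟩
      · exact absurd h hsne
      · intro hnil
        have hscore' : (PySem.Dict.ofList scores).getD s 0 = pvMaxScore scores := by
          rw [pvLook_eq, pvMaxLook_eq]; exact hscore
        have hmem : s ∈ pvCandidates suspects scores :=
          List.mem_filter.mpr ⟨hs, by simp [hscore']⟩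
        simp [hnil] at hmem
    by_cases h1 : (pvCandidates suspects scores).length == 1
    · -- singleton candidate list: both sides return that candidate
      obtain ⟨c, hc⟩ := List.length_eq_one_iff.mp (by simpa using h1)
      simp only [hc]
      obtain ⟨r, hr, hrmem, _⟩ := pvMin2_spec (fun x => pvRank flags x) (fun x => x) [c] (by simp)
      simp only [hr, Option.getD_some, List.headD_cons]
      exact (List.mem_singleton.mp hrmem).symm
    · simp only [h1, Bool.false_eq_true, if_false]
      exact pvLoop_eq_min flags pvPrefs 0 (pvCandidates suspects scores) hcne (by simp [pvPrefs])
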